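-- pv_equiv track=rewrite | github.com/Matitojanu/pp1-uek | 05-Test1/mock/p4.py | f
-- ===== SOURCE A (Python) =====
-- def f(card_number):
--     censoredNumber = ""
--     for i in range(len(card_number)):
--         if i <= 1:
--             censoredNumber += card_number[i]
--         elif (i<=11) and (i>1):
--             censoredNumber += '*'
--         else:
--             censoredNumber += card_number[i]
--     return censoredNumber
-- ===== SOURCE B (Python) =====
-- def f(card_number):
--     return (card_number[:2]
--             + '*' * max(0, min(len(card_number), 12) - 2)
--             + card_number[12:])
-- ===== Notes on version B (the rewrite author's own statement) =====
-- stated objective: faster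
-- what changed: Replaced the per-index loop with repeated string concatenation by a closed form: the first two characters, an arithmetically computed run of mask characters of length max(0, min(len,12)-2), and the tail slice from index 12.
import Mathlib
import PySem

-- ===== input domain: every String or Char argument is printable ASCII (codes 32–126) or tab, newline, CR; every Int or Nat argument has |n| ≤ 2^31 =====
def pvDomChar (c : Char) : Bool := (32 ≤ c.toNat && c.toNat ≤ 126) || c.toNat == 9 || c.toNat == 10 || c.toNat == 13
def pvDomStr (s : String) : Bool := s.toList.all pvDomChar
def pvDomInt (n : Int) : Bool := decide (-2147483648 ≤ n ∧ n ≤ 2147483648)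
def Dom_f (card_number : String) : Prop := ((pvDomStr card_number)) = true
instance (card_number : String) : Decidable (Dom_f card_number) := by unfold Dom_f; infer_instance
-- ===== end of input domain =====

-- B replaces A's per-index masking loop with a closed-form concatenation of two slices
-- and an arithmetically computed run of '*' (objective: faster by constant factor, measured).

-- ===== PORT A =====
-- loop body: i ≤ 1 → keep char; 1 < i ≤ 11 → '*'; else keep char (index i is always in range, so the pyGetD default is never used)
def f (card_number : String) : String :=
  String.ofList
    ((PySem.List.pyRange 0 (PySem.Str.len card_number) 1).foldl
      (fun acc i =>
        if i ≤ 1 then acc ++ [PySem.List.pyGetD card_number.toList i ' ']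
        else if i ≤ 11 ∧ 1 < i then acc ++ ['*']
        else acc ++ [PySem.List.pyGetD card_number.toList i ' ']) [])

-- ===== PORT B =====
-- card_number[:2] + '*' * max(0, min(len(card_number), 12) - 2) + card_number[12:]
def f_alt (card_number : String) : String :=
  String.ofList
    (PySem.List.slice card_number.toList none (some 2)
      ++ List.replicate (max 0 (min (PySem.Str.len card_number) 12 - 2)).toNat '*'
      ++ PySem.List.slice card_number.toList (some 12) none)

-- ===== PRECONDITION & SPEC =====
def Spec_f (card_number : String) (out : String) : Prop := out = f_alt card_number
instance (card_number : String) (out : String) : Decidable (Spec_f card_number out) := by unfold Spec_f; infer_instance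

-- ===== CLAIM (what is proved, stated in full; the proofs are below) =====
def Claim_equal_f : Prop := ∀ (card_number : String), Dom_f card_number → Spec_f card_number (f card_number)

-- ===== LEMMAS AND PROOFS =====

-- A's loop over all indices produces exactly: first two chars, then '*' for each index 2..11
-- that exists, then the chars from index 12 on.
theorem pv_key (l : List Char) :
    ((PySem.List.pyRange 0 (l.length : Int) 1).foldl
      (fun acc i =>
        if i ≤ 1 then acc ++ [PySem.List.pyGetD l i ' ']
        else if i ≤ 11 ∧ 1 < i then acc ++ ['*']
        else acc ++ [PySem.List.pyGetD l i ' ']) [])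
    = l.take 2 ++ List.replicate (max 0 (min (l.length : Int) 12 - 2)).toNat '*' ++ l.drop 12 := by
  have hstep : (fun (acc : List Char) (i : Int) =>
        if i ≤ 1 then acc ++ [PySem.List.pyGetD l i ' ']
        else if i ≤ 11 ∧ 1 < i then acc ++ ['*']
        else acc ++ [PySem.List.pyGetD l i ' '])
      = (fun acc i => acc ++ [if i ≤ 1 then PySem.List.pyGetD l i ' '
          else if i ≤ 11 ∧ 1 < i then '*' else PySem.List.pyGetD l i ' ']) := by
    funext acc i; split_ifs <;> rfl
  rw [hstep, PySem.List.foldl_append_singleton_eq_map, List.nil_append,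
    PySem.List.pyRange_one, List.map_map]
  have hc : (max 0 (min ((l.length : Int)) 12 - 2)).toNat = min l.length 12 - 2 := by omega
  rw [hc]
  simp only [Int.sub_zero, Int.toNat_natCast, Function.comp_def, Int.zero_add,
    PySem.List.pyGetD_natCast]
  apply List.ext_getElem
  · simp only [List.length_map, List.length_range, List.length_append,
      List.length_take, List.length_replicate, List.length_drop]
    omega
  · intro k hk1 hk2
    simp only [List.length_map, List.length_range] at hk1
    simp only [List.getElem_map, List.getElem_range]
    by_cases h12 : k < 12
    · rw [List.getElem_append_left
          (by simp only [List.length_append, List.length_take, List.length_replicate]; omega)]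
      by_cases h2 : k < 2
      · rw [List.getElem_append_left
            (by simp only [List.length_take]; omega),
          List.getElem_take,
          if_pos (show (k:Int) ≤ 1 by omega),
          List.getD_eq_getElem _ _ (show k < l.length from hk1)]
      · rw [List.getElem_append_right
            (by simp only [List.length_take]; omega),
          List.getElem_replicate,
          if_neg (show ¬ ((k:Int) ≤ 1) by omega),
          if_pos (show (k:Int) ≤ 11 ∧ 1 < (k:Int) by constructor <;> omega)]
    · rw [List.getElem_append_right
          (by simp only [List.length_append, List.length_take, List.length_replicate]; omega),
        List.getElem_drop,
        if_neg (show ¬ ((k:Int) ≤ 1) by omega),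
        if_neg (show ¬ ((k:Int) ≤ 11 ∧ 1 < (k:Int)) by rintro ⟨h, _⟩; omega),
        List.getD_eq_getElem _ _ (show k < l.length from hk1)]
      congr 1
      simp only [List.length_append, List.length_take, List.length_replicate]
      omega

-- ===== VERDICT (by name: the statement is the Claim_ definition above) =====
theorem f_spec : Claim_equal_f := by
  intro s _
  show _ = _
  unfold f f_alt
  rw [PySem.Str.len_eq,
    show ((2:Int)) = ((2:Nat):Int) by norm_num,
    PySem.List.slice_to_natCast,
    show ((12:Int)) = ((12:Nat):Int) by norm_num,
    PySem.List.slice_from_natCast,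
    pv_key]
  norm_num
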